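-- pv_equiv track=rewrite | github.com/bobicnina/shiny-spork | functions.py | removeVar
-- ===== SOURCE A (Python) =====
-- def removeVar(phi, var):
--     formulaNew = []
--     for l in phi:
--         lNew = dict(l)
--         for x in var:
--             if x in l and var[x] is l[x]:
--                 del lNew[x]
--         formulaNew.append(lNew)
--     return formulaNew
-- ===== SOURCE B (Python) =====
-- def removeVar(phi, var):
--     return [{k: v for k, v in l.items() if not (k in var and var[k] is v)}
--             for l in phi]
-- ===== Notes on version B (the rewrite author's own statement) =====
-- stated objective: simpler
-- what changed: B builds each new dict in one dict comprehension over l.items(), keeping the non-matching pairs, instead of copying l and iterating over var deleting matching keys from the copy.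
import Mathlib
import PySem

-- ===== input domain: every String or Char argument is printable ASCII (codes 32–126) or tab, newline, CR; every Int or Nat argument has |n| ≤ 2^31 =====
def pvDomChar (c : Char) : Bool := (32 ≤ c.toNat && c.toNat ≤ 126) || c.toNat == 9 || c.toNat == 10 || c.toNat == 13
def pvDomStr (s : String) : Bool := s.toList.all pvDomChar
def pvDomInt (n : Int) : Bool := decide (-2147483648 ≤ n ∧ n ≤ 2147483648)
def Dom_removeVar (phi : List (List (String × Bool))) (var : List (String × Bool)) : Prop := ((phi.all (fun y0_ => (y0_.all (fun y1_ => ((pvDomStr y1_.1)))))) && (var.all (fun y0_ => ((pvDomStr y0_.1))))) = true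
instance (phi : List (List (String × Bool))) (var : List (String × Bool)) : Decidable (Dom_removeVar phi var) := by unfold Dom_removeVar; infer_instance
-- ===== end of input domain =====

-- B replaces A's copy-then-delete loop over var by a single dict comprehension over l.items(); same values, simpler shape.
-- Dicts are encoded as association lists; both ports read them through PySem.Dict.ofList (Python's dict construction).

-- ===== PORT A =====
-- for l in phi: lNew = dict(l); for x in var: if x in l and var[x] is l[x]: del lNew[x]; formulaNew.append(lNew)
def removeVar (phi : List (List (String × Bool))) (var : List (String × Bool)) : List (List (String × Bool)) :=
  phi.foldl
    (fun formulaNew l =>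
      let L : PySem.Dict String Bool := PySem.Dict.ofList l
      let V : PySem.Dict String Bool := PySem.Dict.ofList var
      let lNew :=
        V.keys.foldl
          (fun lNew x => if L.contains x && (V.get? x == L.get? x) then lNew.erase x else lNew)
          L
      formulaNew ++ [lNew.items])
    []

-- ===== PORT B =====
-- [{k: v for k, v in l.items() if not (k in var and var[k] is v)} for l in phi]
def removeVar_alt (phi : List (List (String × Bool))) (var : List (String × Bool)) : List (List (String × Bool)) :=
  let V : PySem.Dict String Bool := PySem.Dict.ofList var
  phi.map (fun l =>
    (PySem.Dict.ofList l).items.filter (fun kv => !(V.contains kv.1 && (V.get? kv.1 == some kv.2))))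

-- ===== PRECONDITION & SPEC =====
def Spec_removeVar (phi : List (List (String × Bool))) (var : List (String × Bool)) (out : List (List (String × Bool))) : Prop := out = removeVar_alt phi var
instance (phi : List (List (String × Bool))) (var : List (String × Bool)) (out : List (List (String × Bool))) : Decidable (Spec_removeVar phi var out) := by unfold Spec_removeVar; infer_instance

-- ===== CLAIM (what is proved, stated in full; the proofs are below) =====
def Claim_equal_removeVar : Prop := ∀ (phi : List (List (String × Bool))) (var : List (String × Bool)), Dom_removeVar phi var → Spec_removeVar phi var (removeVar phi var)

-- ===== LEMMAS AND PROOFS =====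

-- a fold of guarded erases is one filter of the items
theorem items_foldl_erase (c : String → Bool) (ks : List String) (d : PySem.Dict String Bool) :
    (ks.foldl (fun e k => if c k then e.erase k else e) d).items
      = d.items.filter (fun kv => !(c kv.1 && ks.contains kv.1)) := by
  induction ks generalizing d with
  | nil => simp
  | cons k ks ih =>
    simp only [List.foldl_cons]
    rw [ih]
    by_cases hck : c k = true
    · simp only [hck, if_true, PySem.Dict.erase, List.filter_filter]
      apply List.filter_congr
      intro kv _
      by_cases hk : kv.1 = k
      · simp [hk, hck]
      · simp [hk]
    · simp only [hck]
      apply List.filter_congr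
      intro kv _
      by_cases hk : kv.1 = k
      · simp [hk, hck]
      · simp [hk]

theorem inner_eq (l var : List (String × Bool)) :
    ((PySem.Dict.ofList var).keys.foldl
        (fun lNew x =>
          if (PySem.Dict.ofList l).contains x
              && ((PySem.Dict.ofList var).get? x == (PySem.Dict.ofList l).get? x)
            then lNew.erase x else lNew)
        (PySem.Dict.ofList l)).items
      = (PySem.Dict.ofList l).items.filter
          (fun kv => !((PySem.Dict.ofList var).contains kv.1
                        && ((PySem.Dict.ofList var).get? kv.1 == some kv.2))) := by
  rw [items_foldl_erase]
  apply List.filter_congr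
  intro kv hkv
  have hnd : (PySem.Dict.ofList l).keys.Nodup := PySem.Dict.nodup_keys_ofList l
  have hget : (PySem.Dict.ofList l).get? kv.1 = some kv.2 := by
    have : (kv.1, kv.2) ∈ (PySem.Dict.ofList l).items := by simpa using hkv
    exact PySem.Dict.get?_of_mem_items _ this hnd
  have hcontL : (PySem.Dict.ofList l).contains kv.1 = true := by
    rw [PySem.Dict.contains_eq_isSome_get?, hget]; rfl
  by_cases hv : (PySem.Dict.ofList var).get? kv.1 = some kv.2
  · have hcontV : (PySem.Dict.ofList var).contains kv.1 = true := by
      rw [PySem.Dict.contains_eq_isSome_get?, hv]; rfl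
    have hmem : kv.1 ∈ (PySem.Dict.ofList var).keys :=
      (PySem.Dict.contains_iff_mem_keys _ _).mp hcontV
    simp [hcontL, hcontV, hget, hv, hmem]
  · have hbe : ((PySem.Dict.ofList var).get? kv.1 == some kv.2) = false := by
      simp [hv]
    simp [hbe, hget]

theorem foldl_append_eq_map (phi : List (List (String × Bool)))
    (g : List (String × Bool) → List (String × Bool)) (acc : List (List (String × Bool))) :
    phi.foldl (fun a l => a ++ [g l]) acc = acc ++ phi.map g := by
  induction phi generalizing acc with
  | nil => simp
  | cons l phi ih => simp [ih]

-- ===== VERDICT (by name: the statement is the Claim_ definition above) =====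
theorem removeVar_spec : Claim_equal_removeVar := by
  intro phi var _
  unfold Spec_removeVar removeVar removeVar_alt
  simp only
  rw [foldl_append_eq_map]
  simp only [List.nil_append]
  apply List.map_congr_left
  intro l _
  exact inner_eq l var
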